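-- pv_equiv track=rewrite | github.com/iteratedecks/tyrantEvolve | deckHasher.py | deckToHash
-- ===== SOURCE A (Python) =====
-- def deckToHash(idList, sort = False):
--
--     encodedString = ''
--
--     # prep the vars and setup the initial encoding
--     lastId = -1
--     lastCount = 1
--
--     if(sort):
--         temp = list(idList)
--         idList = sorted(temp[1:])
--         idList.insert(0, temp[0])
--
--     for i in range(0, len(idList)):
--         id = idList[i]
--         if(lastId == id):
--             lastCount += 1
--             continue
--         elif(lastCount > 1):
--             lastCount += 4000
--             encodedString += encodeBase64((lastCount >> 6) & 63)
--             encodedString += encodeBase64((lastCount & 63))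
--             lastCount = 1
--
--         lastId = id
--         if(id > 4000):
--             encodedString += "-"
--             id -= 4000
--         encodedString += encodeBase64((id >> 6) & 63)
--         encodedString += encodeBase64((id & 63))
--
--     # need to encode any duplicate ids leftover from the loop
--     if(lastCount > 1):
--         lastId = 4000 + lastCount
--         encodedString += encodeBase64((lastId >> 6) & 63)
--         encodedString += encodeBase64((lastId & 63))
--     return encodedString
--
-- def encodeBase64(x):
--     if (x < 26) : return chr(x + ord('A'))
--     if (x < 52) : return chr(x + ord('a') - 26)
--     if (x < 62) : return chr(x + ord('0') - 52)
--     if (x == 62) : return "+"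
--     return "/"
-- ===== SOURCE B (Python) =====
-- from itertools import groupby
--
--
-- def encodeBase64(x):
--     if (x < 26): return chr(x + ord('A'))
--     if (x < 52): return chr(x + ord('a') - 26)
--     if (x < 62): return chr(x + ord('0') - 52)
--     if (x == 62): return "+"
--     return "/"
--
--
-- def _encodeRun(id, count):
--     s = ''
--     if id > 4000:
--         s += '-'
--         id -= 4000
--     s += encodeBase64((id >> 6) & 63) + encodeBase64(id & 63)
--     if count > 1:
--         c = 4000 + count
--         s += encodeBase64((c >> 6) & 63) + encodeBase64(c & 63)
--     return s
--
--
-- def deckToHash(idList, sort=False):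
--     if sort:
--         temp = list(idList)
--         idList = [temp[0]] + sorted(temp[1:])
--     return ''.join(_encodeRun(k, sum(1 for _ in g)) for k, g in groupby(idList))
-- ===== Notes on version B (the rewrite author's own statement) =====
-- stated objective: idiomatic
-- what changed: Replaces A's single stateful loop threading lastId/lastCount with a duplicated trailing flush by itertools.groupby run-length grouping plus one per-run encoder joined into the result.
-- intended difference: On lists whose first element is -1, A's lastId=-1 sentinel absorbs the leading run of -1 ids and emits only a phantom count marker; B encodes that run like any other id, which is the intended run-length encoding. — e.g. on deckToHash([-1], false): A returns "+i", B returns "//"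
import Mathlib
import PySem

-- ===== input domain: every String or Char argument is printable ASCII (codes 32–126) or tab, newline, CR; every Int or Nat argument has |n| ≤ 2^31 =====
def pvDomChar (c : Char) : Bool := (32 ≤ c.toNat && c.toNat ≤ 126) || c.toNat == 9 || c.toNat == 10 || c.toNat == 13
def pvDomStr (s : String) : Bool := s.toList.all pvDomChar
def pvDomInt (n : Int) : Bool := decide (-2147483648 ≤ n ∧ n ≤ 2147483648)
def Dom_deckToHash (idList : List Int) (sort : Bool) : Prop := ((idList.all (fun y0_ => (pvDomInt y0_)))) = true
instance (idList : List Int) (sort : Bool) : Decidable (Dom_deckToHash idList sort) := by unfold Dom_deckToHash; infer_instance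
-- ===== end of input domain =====

-- B replaces A's stateful accumulator loop (lastId/lastCount threaded through one pass
-- with a trailing flush) by run-length grouping (itertools.groupby) plus a per-run encoder;
-- objective: idiomatic. On lists whose first id is -1 A's sentinel is wrong and B differs (see D_).

-- ===== PORT A =====
def encodeBase64 (x : Int) : String :=
  if x < 26 then String.ofList [Char.ofNat (x + 65).toNat]
  else if x < 52 then String.ofList [Char.ofNat (x + 97 - 26).toNat]
  else if x < 62 then String.ofList [Char.ofNat (x + 48 - 52).toNat]
  else if x = 62 then "+"
  else "/"

-- loop body of A's for-loop; state = (encodedString, lastId, lastCount)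
def deckToHashStep (st : String × Int × Int) (id : Int) : String × Int × Int :=
  let (enc, lastId, lastCount) := st
  if lastId = id then (enc, lastId, lastCount + 1)
  else
    let (enc, lastCount) :=
      if lastCount > 1 then
        let lc := lastCount + 4000
        (enc ++ encodeBase64 (PySem.Int.mod (lc >>> 6) 64) ++ encodeBase64 (PySem.Int.mod lc 64), 1)
      else (enc, lastCount)
    let (enc, id') := if id > 4000 then (enc ++ "-", id - 4000) else (enc, id)
    (enc ++ encodeBase64 (PySem.Int.mod (id' >>> 6) 64) ++ encodeBase64 (PySem.Int.mod id' 64), id, 1)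

def deckToHash (idList : List Int) (sort : Bool) : String :=
  let idList :=
    if sort then
      match idList with
      | [] => []  -- Python raises IndexError here (temp[0]); excluded by Pre_
      | h :: t => h :: PySem.List.sorted t (fun x => x)
    else idList
  let res := idList.foldl deckToHashStep ("", -1, 1)
  let enc := res.1
  let lastCount := res.2.2
  if lastCount > 1 then
    let lastId := 4000 + lastCount
    enc ++ encodeBase64 (PySem.Int.mod (lastId >>> 6) 64) ++ encodeBase64 (PySem.Int.mod lastId 64)
  else enc

-- ===== PORT B =====
def encodeBase64B (x : Int) : String :=
  if x < 26 then String.ofList [Char.ofNat (x + 65).toNat]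
  else if x < 52 then String.ofList [Char.ofNat (x + 97 - 26).toNat]
  else if x < 62 then String.ofList [Char.ofNat (x + 48 - 52).toNat]
  else if x = 62 then "+"
  else "/"

-- itertools.groupby with run lengths: consecutive runs as (id, count)
def pyGroupRuns : List Int → List (Int × Int)
  | [] => []
  | x :: xs =>
    match pyGroupRuns xs with
    | [] => [(x, 1)]
    | (y, c) :: rest => if x = y then (y, c + 1) :: rest else (x, 1) :: (y, c) :: rest

def encodeRunB (id : Int) (count : Int) : String :=
  let (s, id) := if id > 4000 then ("-", id - 4000) else ("", id)
  let s := s ++ encodeBase64B (PySem.Int.mod (id >>> 6) 64) ++ encodeBase64B (PySem.Int.mod id 64)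
  if count > 1 then
    let c := 4000 + count
    s ++ encodeBase64B (PySem.Int.mod (c >>> 6) 64) ++ encodeBase64B (PySem.Int.mod c 64)
  else s

def deckToHash_alt (idList : List Int) (sort : Bool) : String :=
  let idList :=
    if sort then
      match idList with
      | [] => []  -- Python raises IndexError here (temp[0]); excluded by Pre_
      | h :: t => h :: PySem.List.sorted t (fun x => x)
    else idList
  String.join ((pyGroupRuns idList).map (fun r => encodeRunB r.1 r.2))

-- ===== PRECONDITION & SPEC =====
-- Pre_ excludes only sort = true with an empty list, where the Python A (and B) raise IndexError on temp[0].
def Pre_deckToHash (idList : List Int) (sort : Bool) : Prop := sort = true → idList ≠ []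
instance (idList : List Int) (sort : Bool) : Decidable (Pre_deckToHash idList sort) := by
  unfold Pre_deckToHash; infer_instance

def pvWitness_deckToHash : List Int × Bool := ([3, 1, 2, 2], true)

-- On lists whose first element is -1, A's lastId = -1 sentinel absorbs the leading run of -1s and
-- emits only a phantom count marker instead of encoding the id; B encodes the
-- run of -1s like any other id, which is the intended run-length encoding.
def D_deckToHash (idList : List Int) (sort : Bool) : Prop := idList.head? = some (-1)
instance (idList : List Int) (sort : Bool) : Decidable (D_deckToHash idList sort) := by
  unfold D_deckToHash; infer_instance

def Spec_deckToHash (idList : List Int) (sort : Bool) (out : String) : Prop :=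
  ¬ D_deckToHash idList sort → out = deckToHash_alt idList sort
instance (idList : List Int) (sort : Bool) (out : String) : Decidable (Spec_deckToHash idList sort out) := by
  unfold Spec_deckToHash; infer_instance

def pvDiffWitness_deckToHash : List Int × Bool := ([-1], false)
def pvDiffWitnessOut_deckToHash : String × String := ("+i", "//")

-- ===== CLAIM (what is proved, stated in full; the proofs are below) =====
def Claim_unchanged_deckToHash : Prop := ∀ (idList : List Int) (sort : Bool), Dom_deckToHash idList sort → Pre_deckToHash idList sort → Spec_deckToHash idList sort (deckToHash idList sort)
def Claim_changed_deckToHash : Prop := Dom_deckToHash (pvDiffWitness_deckToHash.1) (pvDiffWitness_deckToHash.2) ∧ Pre_deckToHash (pvDiffWitness_deckToHash.1) (pvDiffWitness_deckToHash.2) ∧ D_deckToHash (pvDiffWitness_deckToHash.1) (pvDiffWitness_deckToHash.2) ∧ deckToHash (pvDiffWitness_deckToHash.1) (pvDiffWitness_deckToHash.2) = pvDiffWitnessOut_deckToHash.1 ∧ deckToHash_alt (pvDiffWitness_deckToHash.1) (pvDiffWitness_deckToHash.2) = pvDiffWitnessOut_deckToHash.2 ∧ pvDiffWitnessOut_deckToHash.1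 ≠ pvDiffWitnessOut_deckToHash.2

def Claim_exact_deckToHash : Prop := ∀ (idList : List Int) (sort : Bool), Dom_deckToHash idList sort → Pre_deckToHash idList sort → D_deckToHash idList sort → deckToHash idList sort ≠ deckToHash_alt idList sort

-- ===== LEMMAS AND PROOFS =====

theorem strFoldlAppend (l : List String) : ∀ (s a : String),
    l.foldl (· ++ ·) (s ++ a) = s ++ l.foldl (· ++ ·) a := by
  induction l with
  | nil => intro s a; rfl
  | cons x xs ih => intro s a; rw [List.foldl_cons, List.foldl_cons, String.append_assoc, ih]

theorem strJoin_nil : String.join ([] : List String) = "" := rfl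

theorem strJoin_cons (s : String) (l : List String) : String.join (s :: l) = s ++ String.join l := by
  show l.foldl (· ++ ·) ("" ++ s) = s ++ l.foldl (· ++ ·) ""
  have : ("" ++ s : String) = s ++ "" := by simp
  rw [this, strFoldlAppend]

-- proof-side characterisation of A's loop + final flush, starting from (lastId, lastCount)
def encId (id : Int) : String :=
  (if id > 4000 then "-" ++ encodeBase64 (PySem.Int.mod ((id - 4000) >>> 6) 64) ++ encodeBase64 (PySem.Int.mod (id - 4000) 64)
   else encodeBase64 (PySem.Int.mod (id >>> 6) 64) ++ encodeBase64 (PySem.Int.mod id 64))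

def marker (c : Int) : String :=
  if c > 1 then encodeBase64 (PySem.Int.mod ((c + 4000) >>> 6) 64) ++ encodeBase64 (PySem.Int.mod (c + 4000) 64) else ""

def G (p c : Int) : List Int → String
  | [] => marker c
  | x :: xs => if p = x then G p (c + 1) xs else marker c ++ encId x ++ G x 1 xs

def finishA (st : String × Int × Int) : String :=
  if st.2.2 > 1 then
    st.1 ++ encodeBase64 (PySem.Int.mod ((4000 + st.2.2) >>> 6) 64) ++ encodeBase64 (PySem.Int.mod (4000 + st.2.2) 64)
  else st.1

theorem finishA_foldl_eq (l : List Int) : ∀ (enc : String) (p c : Int),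
    finishA (l.foldl deckToHashStep (enc, p, c)) = enc ++ G p c l := by
  induction l with
  | nil =>
    intro enc p c
    simp only [List.foldl_nil, finishA, G, marker]
    split_ifs <;> simp [Int.add_comm, String.append_assoc]
  | cons x xs ih =>
    intro enc p c
    simp only [List.foldl_cons, deckToHashStep, G]
    by_cases hpx : p = x
    · simp [hpx, ih]
    · simp only [if_neg hpx, ih]
      by_cases hc : c > 1
      · simp only [if_pos hc]
        by_cases hx : x > 4000 <;>
          simp [hx, marker, if_pos hc, encId, String.append_assoc]
      · simp only [if_neg hc]
        by_cases hx : x > 4000 <;>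
          simp [hx, marker, if_neg hc, encId, String.append_assoc]

def joinRuns (rs : List (Int × Int)) : String := String.join (rs.map (fun r => encodeRunB r.1 r.2))

theorem encodeBase64B_eq (x : Int) : encodeBase64B x = encodeBase64 x := rfl

theorem encodeRunB_eq (y k : Int) : encodeRunB y k = encId y ++ marker k := by
  simp only [encodeRunB, encId, marker, encodeBase64B_eq]
  by_cases hy : y > 4000 <;> by_cases hk : k > 1 <;>
    simp [hy, hk, String.append_assoc, Int.add_comm]

-- main invariant: A's remaining loop from run state (x, c) equals the run-length view
theorem G_eq_joinRuns (xs : List Int) : ∀ (x c : Int),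
    G x c xs =
      (match pyGroupRuns xs with
       | [] => marker c
       | (y, k) :: rest => if y = x then marker (c + k) ++ joinRuns rest
                           else marker c ++ joinRuns ((y, k) :: rest)) := by
  induction xs with
  | nil => intro x c; simp [G, pyGroupRuns]
  | cons z zs ih =>
    intro x c
    by_cases hxz : x = z
    · subst hxz
      simp only [G]
      rw [ih x (c + 1)]
      simp only [pyGroupRuns]
      cases hg : pyGroupRuns zs with
      | nil => simp [joinRuns, strJoin_nil]
      | cons r rest =>
        obtain ⟨y, k⟩ := r
        by_cases hxy : x = y
        · subst hxy
          simp [Int.add_comm, Int.add_left_comm]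
        · simp [hxy, Ne.symm hxy, joinRuns, encodeRunB_eq, strJoin_cons, String.append_assoc,
                Int.add_comm]
    · simp only [G, if_neg hxz]
      rw [ih z 1]
      simp only [pyGroupRuns]
      have h1 : marker 1 = "" := by simp [marker]
      cases hg : pyGroupRuns zs with
      | nil =>
        simp [joinRuns, encodeRunB_eq, strJoin_cons, strJoin_nil, Ne.symm hxz, h1]
      | cons r rest =>
        obtain ⟨y, k⟩ := r
        by_cases hzy : y = z
        · subst hzy
          simp [Ne.symm hxz, joinRuns, encodeRunB_eq, strJoin_cons, String.append_assoc,
                Int.add_comm]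
        · have hzy' : ¬ z = y := fun h => hzy h.symm
          simp [hzy', Ne.symm hxz, joinRuns, encodeRunB_eq, strJoin_cons, h1, String.append_assoc]
          exact fun h => absurd h hzy

theorem core_eq (l : List Int) (hhead : l.head? ≠ some (-1)) :
    finishA (l.foldl deckToHashStep ("", -1, 1)) = joinRuns (pyGroupRuns l) := by
  rw [finishA_foldl_eq]
  cases l with
  | nil => simp [G, pyGroupRuns, joinRuns, marker, String.join]
  | cons x xs =>
    have hx : (-1 : Int) ≠ x := by
      intro h; apply hhead; simp [← h]
    simp only [G, if_neg hx]
    rw [G_eq_joinRuns]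
    simp only [pyGroupRuns]
    have h1 : marker 1 = "" := by simp [marker]
    cases hg : pyGroupRuns xs with
    | nil => simp [joinRuns, encodeRunB_eq, strJoin_cons, strJoin_nil, h1]
    | cons r rest =>
      obtain ⟨y, k⟩ := r
      by_cases hxy : y = x
      · subst hxy
        simp [joinRuns, encodeRunB_eq, strJoin_cons, h1, String.append_assoc, Int.add_comm]
      · have hxy' : ¬ x = y := fun h => hxy h.symm
        simp [hxy', joinRuns, encodeRunB_eq, strJoin_cons, h1, String.append_assoc]
        exact fun h => absurd h hxy

theorem counts_pos (xs : List Int) : ∀ r ∈ pyGroupRuns xs, 1 ≤ r.2 := by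
  induction xs with
  | nil => simp [pyGroupRuns]
  | cons z zs ih =>
    intro r hr
    simp only [pyGroupRuns] at hr
    cases hg : pyGroupRuns zs with
    | nil =>
      rw [hg] at hr; simp at hr; simp [hr]
    | cons q rest =>
      obtain ⟨y, c⟩ := q
      rw [hg] at hr
      have hq : 1 ≤ c := ih (y, c) (by rw [hg]; exact List.mem_cons_self)
      by_cases hz : z = y
      · simp [hz] at hr
        rcases hr with h | h
        · rw [h]; omega
        · exact ih r (by rw [hg]; exact List.mem_cons_of_mem _ h)
      · simp [hz] at hr
        rcases hr with h | h | h
        · simp [h]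
        · rw [h]; exact hq
        · exact ih r (by rw [hg]; exact List.mem_cons_of_mem _ h)

theorem joinRuns_cons (r : Int × Int) (rs : List (Int × Int)) :
    joinRuns (r :: rs) = encodeRunB r.1 r.2 ++ joinRuns rs := by
  simp [joinRuns, strJoin_cons]

theorem Gc_nil {xs : List Int} (x c : Int) (hg : pyGroupRuns xs = []) :
    G x c xs = marker c := by
  rw [G_eq_joinRuns, hg]

theorem Gc_merge {xs : List Int} {k : Int} {rest : List (Int × Int)} (x c : Int)
    (hg : pyGroupRuns xs = (x, k) :: rest) :
    G x c xs = marker (c + k) ++ joinRuns rest := by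
  rw [G_eq_joinRuns, hg]; simp

theorem Gc_new {xs : List Int} {y k : Int} {rest : List (Int × Int)} (x c : Int)
    (hg : pyGroupRuns xs = (y, k) :: rest) (hy : ¬ y = x) :
    G x c xs = marker c ++ joinRuns ((y, k) :: rest) := by
  rw [G_eq_joinRuns, hg]; simp [hy]

theorem encB_len (x : Int) : (encodeBase64 x).length = 1 := by
  unfold encodeBase64
  split_ifs <;> first | simp [String.length_ofList] | decide

theorem marker_len (c : Int) (hc : 1 < c) : (marker c).length = 2 := by
  unfold marker
  rw [if_pos hc, String.length_append, encB_len, encB_len]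

theorem core_ne (xs : List Int) :
    finishA (((-1 : Int) :: xs).foldl deckToHashStep ("", -1, 1)) ≠
      joinRuns (pyGroupRuns ((-1 : Int) :: xs)) := by
  rw [finishA_foldl_eq, String.empty_append]
  have hG : G (-1) 1 ((-1 : Int) :: xs) = G (-1) 2 xs := by norm_num [G]
  rw [hG]
  cases hg : pyGroupRuns xs with
  | nil =>
    have hB : pyGroupRuns ((-1 : Int) :: xs) = [(-1, 1)] := by simp [pyGroupRuns, hg]
    rw [Gc_nil (-1) 2 hg, hB]
    decide
  | cons q rest =>
    obtain ⟨y, k⟩ := q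
    have hk : 1 ≤ k := counts_pos xs (y, k) (by rw [hg]; exact List.mem_cons_self)
    by_cases hy : y = -1
    · subst hy
      have hB : pyGroupRuns ((-1 : Int) :: xs) = (-1, k + 1) :: rest := by
        simp [pyGroupRuns, hg]
      rw [Gc_merge (-1) 2 hg, hB, joinRuns_cons]
      intro h
      have hlen := congrArg String.length h
      rw [String.length_append, String.length_append, encodeRunB_eq, String.length_append,
          marker_len (2 + k) (by omega), marker_len (k + 1) (by omega),
          show (encId (-1)).length = 2 from by decide] at hlen
      omega
    · have hy' : ¬ (-1 : Int) = y := fun hh => hy hh.symm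
      have hB : pyGroupRuns ((-1 : Int) :: xs) = (-1, 1) :: (y, k) :: rest := by
        simp [pyGroupRuns, hg, hy']
      rw [Gc_new (-1) 2 hg hy, hB,
          show joinRuns ((-1, 1) :: (y, k) :: rest) =
              (encId (-1) ++ marker 1) ++ joinRuns ((y, k) :: rest) from by
            rw [joinRuns_cons, encodeRunB_eq],
          show ((encId (-1) ++ marker 1 : String)) = "//" from by decide,
          show (marker 2 : String) = "+i" from by decide]
      intro h
      have ht := congrArg String.toList h
      simp only [String.toList_append,
          show ("+i" : String).toList = ['+', 'i'] from by decide,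
          show ("//" : String).toList = ['/', '/'] from by decide] at ht
      simp at ht

-- ===== VERDICT (by name: the statement is the Claim_ definition above) =====
theorem deckToHash_spec : Claim_unchanged_deckToHash := by
  intro idList sort _hdom hpre
  unfold Spec_deckToHash
  intro hD
  simp only [D_deckToHash] at hD
  unfold deckToHash deckToHash_alt
  cases sort with
  | false =>
    simp only [Bool.false_eq_true, if_false]
    exact core_eq idList hD
  | true =>
    cases idList with
    | nil => exact absurd rfl (hpre rfl)
    | cons h t =>
      simp only [if_true]
      apply core_eq
      simp only [List.head?] at hD ⊢
      exact hD

theorem deckToHash_changed : Claim_changed_deckToHash := by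
  unfold Claim_changed_deckToHash; decide

theorem deckToHash_tight : Claim_exact_deckToHash := by
  intro idList sort _hdom _hpre hD
  simp only [D_deckToHash] at hD
  cases idList with
  | nil => simp at hD
  | cons h t =>
    simp only [List.head?, Option.some.injEq] at hD
    subst hD
    cases sort with
    | false => exact core_ne t
    | true =>
      show deckToHash (-1 :: t) true ≠ deckToHash_alt (-1 :: t) true
      unfold deckToHash deckToHash_alt
      simp only [if_true]
      exact core_ne (PySem.List.sorted t (fun x => x))
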